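-- pv_equiv track=rewrite | github.com/yvi7693/algorithms | HW3/main.py | rotate_and_reverse
-- ===== SOURCE A (Python) =====
-- from typing import Any
--
-- def rotate_and_reverse(collection: list[Any], k: int) -> list[Any]:
--     length = len(collection)
--     if k == 0:  return collection
--
--     iteration = 0
--
--     while iteration != k:
--
--         buff = collection[-1]
--
--         for i in range(length-1, 0, -1):
--             collection[i] = collection[i - 1]
--
--         collection[0] = buff
--
--         iteration += 1
--
--     for i in range(length // 2):
--         collection[i], collection[length - 1 - i] = collection[length - 1 - i], collection[i]
--
--     return collection
-- ===== SOURCE B (Python) =====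
-- def rotate_and_reverse(collection, k):
--     if k == 0:
--         return collection
--     length = len(collection)
--     r = k % length
--     src = collection[:]
--     for i in range(length):
--         collection[i] = src[(length - 1 - i - r) % length]
--     return collection
-- ===== Notes on version B (the rewrite author's own statement) =====
-- stated objective: faster
-- what changed: Replaces A's k repeated one-step shift passes plus an in-place swap-reversal pass with a single closed-form permutation pass that writes each position once from a snapshot copy, using k % length.
import Mathlib
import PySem

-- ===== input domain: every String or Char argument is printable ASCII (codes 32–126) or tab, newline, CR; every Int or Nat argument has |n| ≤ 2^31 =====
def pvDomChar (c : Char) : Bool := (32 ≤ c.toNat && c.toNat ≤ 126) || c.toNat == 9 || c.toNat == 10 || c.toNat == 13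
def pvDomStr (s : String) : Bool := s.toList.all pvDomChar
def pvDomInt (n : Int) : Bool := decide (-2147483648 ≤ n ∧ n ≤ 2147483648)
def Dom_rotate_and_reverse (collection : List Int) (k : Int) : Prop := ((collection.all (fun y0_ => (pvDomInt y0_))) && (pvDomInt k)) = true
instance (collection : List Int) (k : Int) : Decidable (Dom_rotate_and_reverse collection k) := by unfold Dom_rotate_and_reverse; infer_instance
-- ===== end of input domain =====

-- B replaces A's k repeated shift-passes plus a swap-reversal pass with one closed-form
-- permutation pass from a snapshot (objective: faster). Both A and B mutate `collection`
-- in place in Python identically; the equivalence proved here is about the return value.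

-- ===== PORT A =====
-- for i in range(length-1, 0, -1): collection[i] = collection[i-1]
-- (argument is the next index to process; reads are in range, so getD matches Python's read)
def pvShiftLoop : Nat → List Int → List Int
  | 0, c => c
  | j+1, c => pvShiftLoop j (c.set (j+1) (c.getD j 0))

-- one iteration of the while body; collection[-1] via pyGet? (in range under Pre_)
def pvShiftOnce (c : List Int) : List Int :=
  let buff := (PySem.List.pyGet? c (-1)).getD 0
  (pvShiftLoop (c.length - 1) c).set 0 buff

-- while iteration != k: runs k times (k ≥ 0 under Pre_; Python diverges for k < 0)
def pvWhileLoop : Nat → List Int → List Int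
  | 0, c => c
  | m+1, c => pvWhileLoop m (pvShiftOnce c)

-- for i in range(length // 2): swap collection[i], collection[length-1-i]
-- (first argument: iterations left; second: current i; reads in range, getD matches)
def pvSwapLoop (n : Nat) : Nat → Nat → List Int → List Int
  | 0, _, c => c
  | m+1, i, c =>
      let a := c.getD i 0
      let b := c.getD (n - 1 - i) 0
      pvSwapLoop n m (i+1) ((c.set i b).set (n - 1 - i) a)

def rotate_and_reverse (collection : List Int) (k : Int) : List Int :=
  let length := collection.length
  if k = 0 then collection
  else
    let c := pvWhileLoop k.toNat collection
    pvSwapLoop length (length / 2) 0 c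

-- ===== PORT B =====
-- for i in range(length): collection[i] = src[(length - 1 - i - r) % length]
-- (first argument: iterations left; i is the Python loop variable; write index i is in range)
def pvFillLoop (src : List Int) (n r : Int) : Nat → Int → List Int → List Int
  | 0, _, c => c
  | m+1, i, c =>
      pvFillLoop src n r m (i+1)
        (c.set i.toNat ((PySem.List.pyGet? src (PySem.Int.mod (n - 1 - i - r) n)).getD 0))

def rotate_and_reverse_alt (collection : List Int) (k : Int) : List Int :=
  if k = 0 then collection
  else
    let n : Int := collection.length
    let r := PySem.Int.mod k n
    let src := collection
    pvFillLoop src n r collection.length 0 collection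

-- ===== PRECONDITION & SPEC =====
-- Pre_ excludes exactly the inputs where Python A returns no value: k < 0 (the while loop
-- never terminates) and collection = [] with k ≠ 0 (collection[-1] raises IndexError).
def Pre_rotate_and_reverse (collection : List Int) (k : Int) : Prop :=
  0 ≤ k ∧ (k = 0 ∨ collection ≠ [])
instance (collection : List Int) (k : Int) : Decidable (Pre_rotate_and_reverse collection k) := by
  unfold Pre_rotate_and_reverse; infer_instance

def pvWitness_rotate_and_reverse : List Int × Int := ([1, 2, 3], 2)

def Spec_rotate_and_reverse (collection : List Int) (k : Int) (out : List Int) : Prop := out = rotate_and_reverse_alt collection k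
instance (collection : List Int) (k : Int) (out : List Int) : Decidable (Spec_rotate_and_reverse collection k out) := by unfold Spec_rotate_and_reverse; infer_instance

-- ===== CLAIM (what is proved, stated in full; the proofs are below) =====
def Claim_equal_rotate_and_reverse : Prop := ∀ (collection : List Int) (k : Int), Dom_rotate_and_reverse collection k → Pre_rotate_and_reverse collection k → Spec_rotate_and_reverse collection k (rotate_and_reverse collection k)

-- ===== LEMMAS AND PROOFS =====

theorem pvShiftLoop_length (j : Nat) (c : List Int) : (pvShiftLoop j c).length = c.length := by
  induction j generalizing c with
  | zero => rfl
  | succ j ih => simp [pvShiftLoop, ih]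

theorem pvShiftLoop_getElem? (j : Nat) (c : List Int) (hj : j < c.length) (t : Nat) :
    (pvShiftLoop j c)[t]? = (if 1 ≤ t ∧ t ≤ j then getElem? c (t - 1) else getElem? c t) := by
  induction j generalizing c with
  | zero => simp only [pvShiftLoop]; rw [if_neg (by omega)]
  | succ j ih =>
    simp only [pvShiftLoop]
    rw [ih _ (by simp only [List.length_set]; omega)]
    by_cases h0 : 1 ≤ t ∧ t ≤ j
    · rw [if_pos h0, if_pos ⟨h0.1, by omega⟩, List.getElem?_set_ne (by omega)]
    · rw [if_neg h0]
      by_cases ht : t = j + 1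
      · subst ht
        rw [if_pos ⟨by omega, le_refl _⟩, List.getElem?_set, if_pos rfl, if_pos hj]
        have hjl : j < c.length := by omega
        simp [List.getD, List.getElem?_eq_getElem hjl]
      · rw [if_neg (by omega), List.getElem?_set_ne (by omega)]

theorem pvShiftOnce_rotate (c : List Int) (hc : c ≠ []) :
    pvShiftOnce c = c.rotate (c.length - 1) := by
  have hn : 0 < c.length := List.length_pos_iff.mpr hc
  apply List.ext_getElem?
  intro t
  by_cases ht : t < c.length
  · rw [List.getElem?_rotate (by omega)]
    unfold pvShiftOnce
    rw [PySem.List.pyGet?_neg_one]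
    rw [List.getElem?_set, pvShiftLoop_getElem? _ _ (by omega)]
    by_cases h0 : t = 0
    · subst h0
      rw [if_pos rfl, if_pos (by rw [pvShiftLoop_length]; omega)]
      have hmod : (0 + (c.length - 1)) % c.length = c.length - 1 := by
        rw [Nat.zero_add]; exact Nat.mod_eq_of_lt (by omega)
      rw [hmod, List.getLast?_eq_getElem?, List.getElem?_eq_getElem (by omega)]
      simp
    · rw [if_neg (by omega), if_pos ⟨by omega, by omega⟩]
      have hmod : (t + (c.length - 1)) % c.length = t - 1 := by
        have h1 : t + (c.length - 1) = (t - 1) + 1 * c.length := by omega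
        rw [h1, Nat.add_mul_mod_self_right]; exact Nat.mod_eq_of_lt (by omega)
      rw [hmod]
  · have l1 : (pvShiftOnce c).length ≤ t := by
      unfold pvShiftOnce
      simp only [List.length_set, pvShiftLoop_length]; omega
    have l2 : (c.rotate (c.length - 1)).length ≤ t := by
      simp only [List.length_rotate]; omega
    rw [List.getElem?_eq_none l1, List.getElem?_eq_none l2]

theorem pvWhileLoop_rotate (m : Nat) (c : List Int) (hc : c ≠ []) :
    pvWhileLoop m c = c.rotate (m * (c.length - 1)) := by
  induction m generalizing c with
  | zero => simp [pvWhileLoop]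
  | succ m ih =>
    simp only [pvWhileLoop]
    rw [pvShiftOnce_rotate c hc,
        ih _ (by simp only [ne_eq, List.rotate_eq_nil_iff]; exact hc)]
    rw [List.length_rotate, List.rotate_rotate]
    congr 1; ring

theorem pvSwapLoop_length (n m : Nat) : ∀ (i : Nat) (c : List Int),
    (pvSwapLoop n m i c).length = c.length := by
  induction m with
  | zero => intro i c; rfl
  | succ m ih => intro i c; simp [pvSwapLoop, ih]

theorem pvSwapLoop_getElem? (n m : Nat) : ∀ (i : Nat) (c : List Int), c.length = n →
    2 * (i + m) ≤ n → ∀ t, t < n →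
    (pvSwapLoop n m i c)[t]? =
      (if (i ≤ t ∧ t < i + m) ∨ (n - i - m ≤ t ∧ t < n - i) then getElem? c (n - 1 - t)
       else getElem? c t) := by
  induction m with
  | zero =>
    intro i c hlen hb t ht
    simp only [pvSwapLoop]
    rw [if_neg (by omega)]
  | succ m ih =>
    intro i c hlen hb t ht
    simp only [pvSwapLoop]
    rw [ih (i+1) _ (by simp only [List.length_set]; omega) (by omega) t ht]
    have hi : i < c.length := by omega
    have hni : n - 1 - i < c.length := by omega
    by_cases h0 : t = i
    · subst h0
      rw [if_neg (by omega), if_pos (by omega)]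
      rw [List.getElem?_set_ne (by omega), List.getElem?_set, if_pos rfl,
          if_pos (by omega)]
      simp [List.getD, List.getElem?_eq_getElem hni]
    · by_cases h1 : t = n - 1 - i
      · subst h1
        rw [if_neg (by omega), if_pos (by omega)]
        rw [List.getElem?_set, if_pos rfl, if_pos (by simp only [List.length_set]; omega)]
        have hii : n - 1 - (n - 1 - i) = i := by omega
        rw [hii]
        simp [List.getD, List.getElem?_eq_getElem hi]
      · have e2 : getElem? ((c.set i (c.getD (n - 1 - i) 0)).set (n - 1 - i) (c.getD i 0)) t
            = getElem? c t := by
          rw [List.getElem?_set_ne (by omega), List.getElem?_set_ne (by omega)]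
        have e3 : getElem? ((c.set i (c.getD (n - 1 - i) 0)).set (n - 1 - i) (c.getD i 0)) (n - 1 - t)
            = getElem? c (n - 1 - t) := by
          rw [List.getElem?_set_ne (by omega), List.getElem?_set_ne (by omega)]
        by_cases hcnd : (i+1 ≤ t ∧ t < i+1+m) ∨ (n - (i+1) - m ≤ t ∧ t < n - (i+1))
        · rw [if_pos hcnd, if_pos (by omega), e3]
        · rw [if_neg hcnd, if_neg (by omega), e2]

theorem pvSwapLoop_reverse (c : List Int) :
    pvSwapLoop c.length (c.length / 2) 0 c = c.reverse := by
  apply List.ext_getElem?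
  intro t
  by_cases ht : t < c.length
  · rw [pvSwapLoop_getElem? c.length (c.length / 2) 0 c rfl (by omega) t ht,
        List.getElem?_reverse ht]
    by_cases h : (0 ≤ t ∧ t < 0 + c.length / 2) ∨
        (c.length - 0 - c.length / 2 ≤ t ∧ t < c.length - 0)
    · rw [if_pos h]
    · rw [if_neg h]
      congr 1; omega
  · rw [List.getElem?_eq_none (by rw [pvSwapLoop_length]; omega),
        List.getElem?_eq_none (by rw [List.length_reverse]; omega)]

theorem pvFillLoop_length (src : List Int) (n r : Int) (m : Nat) :
    ∀ (i : Int) (c : List Int), (pvFillLoop src n r m i c).length = c.length := by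
  induction m with
  | zero => intro i c; rfl
  | succ m ih => intro i c; simp [pvFillLoop, ih]

theorem pvFillLoop_getElem? (src : List Int) (n r : Int) (m : Nat) :
    ∀ (i : Nat) (c : List Int), i + m ≤ c.length → ∀ t, t < c.length →
    (pvFillLoop src n r m (i : Int) c)[t]? =
      (if i ≤ t ∧ t < i + m then
        some ((PySem.List.pyGet? src (PySem.Int.mod (n - 1 - (t : Int) - r) n)).getD 0)
      else getElem? c t) := by
  induction m with
  | zero =>
    intro i c hm t ht
    simp only [pvFillLoop]
    rw [if_neg (by omega)]
  | succ m ih =>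
    intro i c hm t ht
    simp only [pvFillLoop]
    have hcast : ((i : Int) + 1) = ((i + 1 : Nat) : Int) := by push_cast; ring
    have htn : ((i : Int)).toNat = i := by omega
    rw [hcast, htn,
        ih (i+1) _ (by simp only [List.length_set]; omega) t
          (by simp only [List.length_set]; omega)]
    by_cases h0 : t = i
    · subst h0
      rw [if_neg (by omega), if_pos (by omega), List.getElem?_set, if_pos rfl,
          if_pos (by omega)]
    · by_cases h1 : i + 1 ≤ t ∧ t < i + 1 + m
      · rw [if_pos h1, if_pos (by omega)]
      · rw [if_neg h1, if_neg (by omega), List.getElem?_set_ne (by omega)]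

-- ===== VERDICT (by name: the statement is the Claim_ definition above) =====
theorem rotate_and_reverse_spec : Claim_equal_rotate_and_reverse := by
  intro collection k _hdom hpre
  unfold Spec_rotate_and_reverse rotate_and_reverse rotate_and_reverse_alt
  obtain ⟨hk, hk0⟩ := hpre
  by_cases hz : k = 0
  · simp [hz]
  · have hc : collection ≠ [] := by tauto
    have hn : 0 < collection.length := List.length_pos_iff.mpr hc
    have hkm : (k.toNat : Int) = k := Int.toNat_of_nonneg hk
    rw [if_neg hz, if_neg hz]
    show pvSwapLoop collection.length (collection.length / 2) 0 (pvWhileLoop k.toNat collection)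
        = pvFillLoop collection (collection.length : Int)
            (PySem.Int.mod k (collection.length : Int)) collection.length 0 collection
    rw [pvWhileLoop_rotate k.toNat collection hc]
    apply List.ext_getElem?
    intro t
    have hpos : (0 : Int) < (collection.length : Int) := by exact_mod_cast hn
    by_cases ht : t < collection.length
    · -- A side: swap-reversal of the rotated list, elementwise
      have hrev := pvSwapLoop_reverse (collection.rotate (k.toNat * (collection.length - 1)))
      rw [List.length_rotate] at hrev
      rw [hrev, List.getElem?_reverse (by simp only [List.length_rotate]; omega),
          List.length_rotate,
          List.getElem?_rotate (by omega)]
      -- B side: one write per index from the snapshot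
      rw [show (0 : Int) = ((0 : Nat) : Int) by norm_num,
          pvFillLoop_getElem? collection _ _ collection.length 0 collection (by omega) t ht,
          if_pos (by omega)]
      have hmodeq : PySem.Int.mod ((collection.length : Int) - 1 - (t : Int)
            - PySem.Int.mod k (collection.length : Int)) (collection.length : Int)
          = ((collection.length : Int) - 1 - (t : Int) - k) % (collection.length : Int) := by
        rw [PySem.Int.mod_eq_emod_of_pos hpos, PySem.Int.mod_eq_emod_of_pos hpos,
            Int.sub_emod, Int.emod_emod_of_dvd _ (dvd_refl _), ← Int.sub_emod]
      rw [hmodeq]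
      have hidx : (((collection.length : Int) - 1 - (t : Int) - k) % (collection.length : Int))
          = (((collection.length - 1 - t + k.toNat * (collection.length - 1))
              % collection.length : Nat) : Int) := by
        push_cast
        rw [show ((collection.length - 1 - t : Nat) : Int)
              = (collection.length : Int) - 1 - t by omega,
            show ((collection.length - 1 : Nat) : Int) = (collection.length : Int) - 1 by omega,
            show (collection.length : Int) - 1 - t + (k.toNat : Int) * ((collection.length : Int) - 1)
              = ((collection.length : Int) - 1 - t - k.toNat)
                + (collection.length : Int) * k.toNat by ring,
            Int.add_mul_emod_self_left, hkm]
      rw [hidx, PySem.List.pyGet?_natCast]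
      have hmlt : (collection.length - 1 - t + k.toNat * (collection.length - 1))
          % collection.length < collection.length := Nat.mod_lt _ hn
      rw [List.getElem?_eq_getElem hmlt]
      simp
    · rw [List.getElem?_eq_none (by rw [pvSwapLoop_length, List.length_rotate]; omega),
          List.getElem?_eq_none (by rw [pvFillLoop_length]; omega)]
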